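-- pv_equiv track=rewrite | github.com/TalitaAnthonio/tacl | analyse-predictions/tools.py | check_if_filler_occurs
-- ===== SOURCE A (Python) =====
-- from collections import Counter
--
-- def check_if_filler_occurs(context, predictions):
--     d = Counter()
--
--     # make a dict with tokens
--     tokens_in_context = [token for token in context]
--     for token in tokens_in_context:
--         d[token] += 1
--
--     d = dict(d)
--
--
--     # make a dict that indicates how often the filler occurs in the previous context.
--     dict_with_frequencies_per_prediction = {}
--     for prediction in predictions:
--         if prediction in d.keys():
--            dict_with_frequencies_per_prediction[prediction] = d[prediction]
--         else:
--             dict_with_frequencies_per_prediction[prediction] = 0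
--
--     return dict_with_frequencies_per_prediction
-- ===== SOURCE B (Python) =====
-- def check_if_filler_occurs(context, predictions):
--     result = {}
--     for prediction in predictions:
--         result[prediction] = 0
--     for token in context:
--         if token in result:
--             result[token] += 1
--     return result
-- ===== Notes on version B (the rewrite author's own statement) =====
-- stated objective: alternative
-- what changed: Inverts the loop structure: instead of building a Counter frequency table of the whole context and then looking each prediction up, B pre-seeds the result dict with zeros for all predictions and makes one pass over the context incrementing only the keys it tracks; no table over the context's tokens is ever built.
import Mathlib
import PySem

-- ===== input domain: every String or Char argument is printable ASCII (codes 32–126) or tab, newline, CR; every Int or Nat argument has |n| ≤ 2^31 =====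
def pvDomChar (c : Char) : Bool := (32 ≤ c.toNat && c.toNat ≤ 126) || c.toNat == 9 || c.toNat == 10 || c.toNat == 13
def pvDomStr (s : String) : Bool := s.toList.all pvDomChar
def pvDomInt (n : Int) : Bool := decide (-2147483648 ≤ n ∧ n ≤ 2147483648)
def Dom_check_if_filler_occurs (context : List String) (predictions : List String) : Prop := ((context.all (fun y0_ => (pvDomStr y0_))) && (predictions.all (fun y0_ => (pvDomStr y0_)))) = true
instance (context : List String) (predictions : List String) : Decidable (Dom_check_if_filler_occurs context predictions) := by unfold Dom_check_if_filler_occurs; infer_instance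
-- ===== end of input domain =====

-- B inverts A's loop structure: it pre-seeds the result dict with zeros for all predictions and
-- makes a single pass over the context incrementing only tracked keys; no Counter of the context is built (alternative, not faster).


-- ===== PORT A =====
def check_if_filler_occurs (context : List String) (predictions : List String) : List (String × Int) :=
  -- tokens_in_context = [token for token in context]
  let tokens_in_context := context.map (fun token => token)
  -- for token in tokens_in_context: d[token] += 1   (Counter)
  let d := tokens_in_context.foldl (fun d token => d.modify token 0 (· + 1))
    (PySem.Dict.empty : PySem.Dict String Int)
  -- for prediction in predictions: if prediction in d.keys(): … else: … = 0
  let res := predictions.foldl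
    (fun r prediction =>
      if d.contains prediction then r.insert prediction (d.getD prediction 0)
      else r.insert prediction 0)
    (PySem.Dict.empty : PySem.Dict String Int)
  res.items

-- ===== PORT B =====
def check_if_filler_occurs_alt (context : List String) (predictions : List String) : List (String × Int) :=
  -- result = {}; for prediction in predictions: result[prediction] = 0
  let result := predictions.foldl (fun r prediction => r.insert prediction (0 : Int))
    (PySem.Dict.empty : PySem.Dict String Int)
  -- for token in context: if token in result: result[token] += 1
  let result := context.foldl
    (fun r token => if r.contains token then r.modify token 0 (· + 1) else r) result
  result.items

-- ===== PRECONDITION & SPEC =====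
def Spec_check_if_filler_occurs (context : List String) (predictions : List String) (out : List (String × Int)) : Prop := out = check_if_filler_occurs_alt context predictions
instance (context : List String) (predictions : List String) (out : List (String × Int)) : Decidable (Spec_check_if_filler_occurs context predictions out) := by unfold Spec_check_if_filler_occurs; infer_instance

-- ===== CLAIM =====
def Claim_equal_check_if_filler_occurs : Prop := ∀ (context : List String) (predictions : List String), Dom_check_if_filler_occurs context predictions → Spec_check_if_filler_occurs context predictions (check_if_filler_occurs context predictions)

-- ===== LEMMAS AND PROOFS =====

-- B's context pass: the key list is unchanged and each value grows by that key's count in the context.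
theorem ctx_pass_items (context : List String) (d : PySem.Dict String Int)
    (hnd : d.keys.Nodup) :
    (context.foldl (fun r token => if r.contains token then r.modify token 0 (· + 1) else r) d).items
      = d.items.map (fun p => (p.1, p.2 + (context.count p.1 : Int))) := by
  induction context generalizing d with
  | nil => simp
  | cons t ts ih =>
    simp only [List.foldl_cons]
    by_cases hc : d.contains t = true
    · rw [if_pos hc]
      have hnd' : (d.modify t 0 (· + 1)).keys.Nodup :=
        PySem.Dict.nodup_keys_insert d t (d.getD t 0 + 1) hnd
      rw [ih _ hnd']
      have hitems : (d.modify t 0 (· + 1)).items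
          = d.items.map (fun p => if p.1 == t then (t, d.getD t 0 + 1) else p) := by
        show (d.insert t (d.getD t 0 + 1)).items = _
        rw [PySem.Dict.items_insert_of_contains _ _ hc]
      rw [hitems, List.map_map]
      apply List.map_congr_left
      intro p hp
      by_cases he : p.1 = t
      · have hv : d.getD t 0 = p.2 := by
          rw [← he] at *
          exact PySem.Dict.getD_of_mem_items d (by simpa using hp) hnd 0
        simp [Function.comp, he, hv]
        ring
      · simp [Function.comp, he, Ne.symm he]
    · rw [if_neg hc, ih _ hnd]
      apply List.map_congr_left
      intro p hp
      have he : p.1 ≠ t := by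
        intro h
        have : d.contains p.1 = true := by
          rw [PySem.Dict.contains_iff_mem_keys]
          exact PySem.Dict.mem_keys_of_mem_items d hp
        rw [h] at this; exact absurd this (by simpa using hc)
      simp [Ne.symm he]

-- A's result pass tracks B's zero-seeding pass: same keys, A's value is g of the key.
theorem seed_vs_fill (g : String → Int) (predictions : List String)
    (d1 d2 : PySem.Dict String Int)
    (hrel : d2.items = d1.items.map (fun q => (q.1, g q.1))) :
    (predictions.foldl (fun r p => r.insert p (g p)) d2).items
      = (predictions.foldl (fun r p => r.insert p (0 : Int)) d1).items.map
          (fun q => (q.1, g q.1)) := by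
  induction predictions generalizing d1 d2 with
  | nil => simpa using hrel
  | cons p ps ih =>
    simp only [List.foldl_cons]
    apply ih
    have hkeys : d2.contains p = d1.contains p := by
      have : d2.keys = d1.keys := by
        simp only [PySem.Dict.keys, hrel, List.map_map]
        rfl
      simp only [PySem.Dict.contains_eq_decide_mem_keys, this]
    by_cases hc : d1.contains p = true
    · rw [PySem.Dict.items_insert_of_contains _ _ (hkeys.trans hc),
          PySem.Dict.items_insert_of_contains _ _ hc, hrel,
          List.map_map, List.map_map]
      apply List.map_congr_left
      intro q _
      by_cases he : q.1 == p <;> simp [Function.comp, he]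
    · have hc1 : d1.contains p = false := by simpa using hc
      rw [PySem.Dict.items_insert_of_not_contains _ _ (hkeys.trans hc1),
          PySem.Dict.items_insert_of_not_contains _ _ hc1, hrel, List.map_append]
      rfl

-- every value seeded by B's first pass is 0
theorem seed_values_zero (predictions : List String) (d : PySem.Dict String Int)
    (h : ∀ q ∈ d.items, q.2 = (0 : Int)) :
    ∀ q ∈ (predictions.foldl (fun r p => r.insert p (0 : Int)) d).items, q.2 = (0 : Int) := by
  induction predictions generalizing d with
  | nil => exact h
  | cons p ps ih =>
    simp only [List.foldl_cons]
    apply ih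
    intro q hq
    rcases (PySem.Dict.mem_items_insert _ _ _ _).mp hq with h1 | h2
    · rw [h1]
    · exact h q h2.1

-- ===== VERDICT =====
theorem check_if_filler_occurs_spec : Claim_equal_check_if_filler_occurs := by
  intro context predictions _
  unfold Spec_check_if_filler_occurs check_if_filler_occurs check_if_filler_occurs_alt
  simp only [List.map_id']
  rw [show context.foldl (fun d token => d.modify token 0 (· + 1))
        (PySem.Dict.empty : PySem.Dict String Int) = PySem.Dict.counter context from
      (PySem.Dict.counter_eq_foldl context).symm]
  -- A's result fold inserts the count of each prediction
  have hA : (predictions.foldl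
      (fun r p =>
        if (PySem.Dict.counter context).contains p
        then r.insert p ((PySem.Dict.counter context).getD p 0)
        else r.insert p 0)
      (PySem.Dict.empty : PySem.Dict String Int))
    = predictions.foldl (fun r p => r.insert p (context.count p : Int))
        (PySem.Dict.empty : PySem.Dict String Int) := by
    apply PySem.List.foldl_congr_mem
    intro r p _
    by_cases hc : (PySem.Dict.counter context).contains p = true
    · simp [hc, PySem.Dict.getD_counter]
    · have hnot : p ∉ context := by
        intro hm
        exact hc (by simpa [PySem.Dict.contains_counter] using hm)
      simp [hc, List.count_eq_zero.mpr hnot]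
  rw [hA]
  -- B's context pass on the zero-seeded dict
  have hndB : (predictions.foldl (fun r p => r.insert p (0 : Int))
      (PySem.Dict.empty : PySem.Dict String Int)).keys.Nodup :=
    PySem.Dict.nodup_keys_foldl_insert _ _ _ PySem.Dict.nodup_keys_empty
  rw [ctx_pass_items context _ hndB]
  rw [seed_vs_fill (fun k => (context.count k : Int)) predictions
      PySem.Dict.empty PySem.Dict.empty (by rfl)]
  apply List.map_congr_left
  intro q hq
  have hz : q.2 = (0 : Int) := seed_values_zero predictions PySem.Dict.empty (by intro q hq; exact absurd hq (by simp [show (PySem.Dict.empty : PySem.Dict String Int).items = [] from rfl])) q hq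
  simp [hz]
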